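-- pv_equiv track=rewrite | github.com/LindgeW/MetaAug4NER | utils/tag_util.py | extract_cws_bis_span
-- ===== SOURCE A (Python) =====
-- def extract_cws_bis_span(tag_seq):
--     spans = []
--     s = 0
--     n = len(tag_seq)
--     start = False
--     for i, tag in enumerate(tag_seq):
--         if tag == 'S':
--             spans.append((i, i))
--             start = False
--         elif tag == 'B':
--             s = i
--             start = True
--         elif tag == 'I':
--             if start:
--                 if i + 1 == n or tag_seq[i + 1] != 'I':
--                     spans.append((s, i))
--                     start = False
--         else:
--             start = False
--
--     return spans
-- ===== SOURCE B (Python) =====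
-- def extract_cws_bis_span(tag_seq):
--     # flush-at-boundary state machine: no lookahead; close the open B..I run
--     # (tracked by its last-I index cur_end) retrospectively at each boundary.
--     spans = []
--     opened = False
--     s = 0
--     cur_end = None
--
--     def flush():
--         if opened and cur_end is not None:
--             spans.append((s, cur_end))
--
--     for i, tag in enumerate(tag_seq):
--         if tag == 'B':
--             flush()
--             opened, s, cur_end = True, i, None
--         elif tag == 'I':
--             if opened:
--                 cur_end = i
--         elif tag == 'S':
--             flush()
--             opened, cur_end = False, None
--             spans.append((i, i))
--         else:
--             flush()
--             opened, cur_end = False, None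
--     flush()
--     return spans
-- ===== Notes on version B (the rewrite author's own statement) =====
-- stated objective: alternative
-- what changed: Replaced A's one-step lookahead at tag_seq[i+1] with a flush-at-boundary state machine that tracks the last I index of the open B..I run and emits the span retrospectively at the next boundary (B/S/other/end), never indexing ahead.
import Mathlib
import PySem

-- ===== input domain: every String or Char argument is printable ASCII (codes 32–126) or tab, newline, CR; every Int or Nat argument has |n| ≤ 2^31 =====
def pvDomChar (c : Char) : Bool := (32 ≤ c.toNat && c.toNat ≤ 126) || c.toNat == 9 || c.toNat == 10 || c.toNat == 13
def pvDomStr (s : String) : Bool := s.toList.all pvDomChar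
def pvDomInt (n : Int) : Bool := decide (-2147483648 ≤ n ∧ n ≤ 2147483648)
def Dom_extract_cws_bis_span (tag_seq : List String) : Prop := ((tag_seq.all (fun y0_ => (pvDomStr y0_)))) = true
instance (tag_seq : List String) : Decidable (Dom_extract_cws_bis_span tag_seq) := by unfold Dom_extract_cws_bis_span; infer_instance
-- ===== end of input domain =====

-- B re-derives the same spans with a flush-at-boundary state machine (last-I index, no lookahead) instead of A's peek at tag_seq[i+1]; objective: alternative decomposition, same cost.


-- ===== PORT A =====
-- for-loop over (i, tag) with A's lookahead tag_seq[i+1]; rest is the not-yet-visited suffix, k the current index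
def pvLoopA (tag_seq : List String) (n : Int) :
    List String → Nat → List (Int × Int) → Int → Bool → List (Int × Int)
  | [], _, spans, _, _ => spans
  | tag :: rest, k, spans, s, start =>
    if tag = "S" then pvLoopA tag_seq n rest (k+1) (spans ++ [((k : Int), (k : Int))]) s false
    else if tag = "B" then pvLoopA tag_seq n rest (k+1) spans (k : Int) true
    else if tag = "I" then
      if start then
        if (k : Int) + 1 = n ∨ PySem.List.pyGet? tag_seq ((k : Int) + 1) ≠ some "I" then
          pvLoopA tag_seq n rest (k+1) (spans ++ [(s, (k : Int))]) s false
        else pvLoopA tag_seq n rest (k+1) spans s start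
      else pvLoopA tag_seq n rest (k+1) spans s start
    else pvLoopA tag_seq n rest (k+1) spans s false

def extract_cws_bis_span (tag_seq : List String) : List (Int × Int) :=
  pvLoopA tag_seq (tag_seq.length : Int) tag_seq 0 [] 0 false

-- ===== PORT B =====
-- flush(): emit the open span (s, cur_end) if one is pending
def pvFlush (spans : List (Int × Int)) (opened : Bool) (s : Int) (ce : Option Int) : List (Int × Int) :=
  if opened then
    match ce with
    | some e => spans ++ [(s, e)]
    | none => spans
  else spans

def pvLoopB : List String → Nat → List (Int × Int) → Bool → Int → Option Int → List (Int × Int)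
  | [], _, spans, opened, s, ce => pvFlush spans opened s ce
  | tag :: rest, k, spans, opened, s, ce =>
    if tag = "B" then pvLoopB rest (k+1) (pvFlush spans opened s ce) true (k : Int) none
    else if tag = "I" then
      if opened then pvLoopB rest (k+1) spans opened s (some (k : Int))
      else pvLoopB rest (k+1) spans opened s ce
    else if tag = "S" then
      pvLoopB rest (k+1) (pvFlush spans opened s ce ++ [((k : Int), (k : Int))]) false s none
    else pvLoopB rest (k+1) (pvFlush spans opened s ce) false s none

def extract_cws_bis_span_alt (tag_seq : List String) : List (Int × Int) :=
  pvLoopB tag_seq 0 [] false 0 none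

-- ===== PRECONDITION & SPEC =====
def Spec_extract_cws_bis_span (tag_seq : List String) (out : List (Int × Int)) : Prop := out = extract_cws_bis_span_alt tag_seq
instance (tag_seq : List String) (out : List (Int × Int)) : Decidable (Spec_extract_cws_bis_span tag_seq out) := by unfold Spec_extract_cws_bis_span; infer_instance

-- ===== CLAIM (what is proved, stated in full; the proofs are below) =====
def Claim_equal_extract_cws_bis_span : Prop := ∀ (tag_seq : List String), Dom_extract_cws_bis_span tag_seq → Spec_extract_cws_bis_span tag_seq (extract_cws_bis_span tag_seq)

-- ===== LEMMAS AND PROOFS =====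

-- relation between A's state and B's state at a sync point; `next` is the next tag (none at end)
def pvInv (next : Option String) (spansA : List (Int × Int)) (sA : Int) (startA : Bool)
    (spansB : List (Int × Int)) (opened : Bool) (sB : Int) (ce : Option Int) : Prop :=
  match opened, ce with
  | false, _ => ce = none ∧ startA = false ∧ spansA = spansB
  | true, none => startA = true ∧ sA = sB ∧ spansA = spansB
  | true, some e =>
      sA = sB ∧
      (if next = some "I" then startA = true ∧ spansA = spansB
       else startA = false ∧ spansA = spansB ++ [(sB, e)])

-- A's lookahead test is exactly "the next remaining tag is not 'I'"
theorem pvLook (tag_seq : List String) (k : Nat) (tag : String) (rest : List String)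
    (h : tag_seq.drop k = tag :: rest) :
    (((k : Int) + 1 = (tag_seq.length : Int) ∨ PySem.List.pyGet? tag_seq ((k : Int) + 1) ≠ some "I")
      ↔ rest.head? ≠ some "I") := by
  have hk : k < tag_seq.length := by
    by_contra hk
    simp [List.drop_eq_nil_of_le (Nat.le_of_not_lt hk)] at h
  have hrest : rest = tag_seq.drop (k + 1) := by
    have := congrArg List.tail h
    simpa [List.tail_drop] using this.symm
  have hhead : rest.head? = tag_seq[k+1]? := by
    subst hrest
    simp [List.head?_eq_getElem?, List.getElem?_drop]
  have hget : PySem.List.pyGet? tag_seq ((k : Int) + 1) = tag_seq[k+1]? := by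
    have := PySem.List.pyGet?_natCast tag_seq (k+1)
    simpa [Nat.cast_add] using this
  constructor
  · rintro (hend | hne)
    · have hlen : tag_seq.length = k + 1 := by omega
      rw [hhead]
      have : tag_seq[k+1]? = none := List.getElem?_eq_none (by omega)
      simp [this]
    · rw [hhead, ← hget]; exact hne
  · intro hne
    right
    rw [hget, ← hhead]; exact hne

theorem pvMain (tag_seq : List String) :
    ∀ (rest : List String) (k : Nat) (spansA : List (Int × Int)) (sA : Int) (startA : Bool)
      (spansB : List (Int × Int)) (opened : Bool) (sB : Int) (ce : Option Int),
      tag_seq.drop k = rest →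
      pvInv rest.head? spansA sA startA spansB opened sB ce →
      pvLoopA tag_seq (tag_seq.length : Int) rest k spansA sA startA
        = pvLoopB rest k spansB opened sB ce := by
  intro rest
  induction rest with
  | nil =>
    intro k spansA sA startA spansB opened sB ce _ hinv
    cases opened with
    | false =>
      obtain ⟨hce, _, hsp⟩ := hinv
      simp [pvLoopA, pvLoopB, pvFlush, hsp]
    | true =>
      cases ce with
      | none =>
        obtain ⟨_, _, hsp⟩ := hinv
        simp [pvLoopA, pvLoopB, pvFlush, hsp]
      | some e =>
        obtain ⟨hs, hrest⟩ := hinv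
        simp at hrest
        obtain ⟨_, hsp⟩ := hrest
        simp [pvLoopA, pvLoopB, pvFlush, hsp]
  | cons tag rest ih =>
    intro k spansA sA startA spansB opened sB ce hdrop hinv
    have hdrop' : tag_seq.drop (k+1) = rest := by
      have := congrArg List.tail hdrop
      simpa [List.tail_drop] using this
    have hlook := pvLook tag_seq k tag rest hdrop
    -- unpack the invariant into usable equations by cases
    by_cases hB : tag = "B"
    · subst hB
      cases opened with
      | false =>
        obtain ⟨hce, hst, hsp⟩ := hinv
        subst hst
        rw [pvLoopA, pvLoopB]
        simp only [String.reduceEq, reduceIte]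
        exact ih (k+1) spansA ((k:Int)) true (pvFlush spansB false sB ce) true (k:Int) none hdrop'
          (by simp [pvInv, pvFlush, hsp])
      | true =>
        cases ce with
        | none =>
          obtain ⟨hst, hs, hsp⟩ := hinv
          subst hst
          rw [pvLoopA, pvLoopB]
          simp only [String.reduceEq, reduceIte]
          exact ih (k+1) spansA ((k:Int)) true (pvFlush spansB true sB none) true (k:Int) none hdrop'
            (by simp [pvInv, pvFlush, hsp])
        | some e =>
          obtain ⟨hs, hrest⟩ := hinv
          simp at hrest
          obtain ⟨hst, hsp⟩ := hrest
          subst hst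
          rw [pvLoopA, pvLoopB]
          simp only [String.reduceEq, reduceIte]
          exact ih (k+1) spansA ((k:Int)) true (pvFlush spansB true sB (some e)) true (k:Int) none hdrop'
            (by simp [pvInv, pvFlush, hsp])
    · by_cases hI : tag = "I"
      · subst hI
        cases opened with
        | false =>
          obtain ⟨hce, hst, hsp⟩ := hinv
          subst hst
          rw [pvLoopA, pvLoopB]
          simp only [String.reduceEq, reduceIte, Bool.false_eq_true]
          exact ih (k+1) spansA sA false spansB false sB ce hdrop'
            (by simp [pvInv, hce, hsp])
        | true =>
          cases ce with
          | none =>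
            obtain ⟨hst, hs, hsp⟩ := hinv
            subst hst
            rw [pvLoopA, pvLoopB]
            simp only [String.reduceEq, reduceIte]
            by_cases hnext : rest.head? = some "I"
            · rw [if_neg (by rw [hlook]; simpa using hnext)]
              exact ih (k+1) spansA sA true spansB true sB (some (k:Int)) hdrop'
                (by simp [pvInv, hnext, hs, hsp])
            · rw [if_pos (by rw [hlook]; exact hnext)]
              exact ih (k+1) (spansA ++ [(sA, (k:Int))]) sA false spansB true sB (some (k:Int)) hdrop'
                (by simp [pvInv, hnext, hs, hsp])
          | some e =>
            obtain ⟨hs, hrest⟩ := hinv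
            have hcur : ((("I":String) :: rest).head? = some "I") := rfl
            rw [if_pos hcur] at hrest
            obtain ⟨hst, hsp⟩ := hrest
            subst hst
            rw [pvLoopA, pvLoopB]
            simp only [String.reduceEq, reduceIte]
            by_cases hnext : rest.head? = some "I"
            · rw [if_neg (by rw [hlook]; simpa using hnext)]
              exact ih (k+1) spansA sA true spansB true sB (some (k:Int)) hdrop'
                (by simp [pvInv, hnext, hs, hsp])
            · rw [if_pos (by rw [hlook]; exact hnext)]
              exact ih (k+1) (spansA ++ [(sA, (k:Int))]) sA false spansB true sB (some (k:Int)) hdrop'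
                (by simp [pvInv, hnext, hs, hsp])
      · by_cases hS : tag = "S"
        · subst hS
          cases opened with
          | false =>
            obtain ⟨hce, hst, hsp⟩ := hinv
            subst hst
            rw [pvLoopA, pvLoopB]
            simp only [String.reduceEq, reduceIte]
            exact ih (k+1) (spansA ++ [((k:Int),(k:Int))]) sA false
              (pvFlush spansB false sB ce ++ [((k:Int),(k:Int))]) false sB none hdrop'
              (by simp [pvInv, pvFlush, hsp])
          | true =>
            cases ce with
            | none =>
              obtain ⟨hst, hs, hsp⟩ := hinv
              rw [pvLoopA, pvLoopB]
              simp only [String.reduceEq, reduceIte]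
              exact ih (k+1) (spansA ++ [((k:Int),(k:Int))]) sA false
                (pvFlush spansB true sB none ++ [((k:Int),(k:Int))]) false sB none hdrop'
                (by simp [pvInv, pvFlush, hsp])
            | some e =>
              obtain ⟨hs, hrest⟩ := hinv
              rw [if_neg (by simp)] at hrest
              obtain ⟨hst, hsp⟩ := hrest
              rw [pvLoopA, pvLoopB]
              simp only [String.reduceEq, reduceIte]
              exact ih (k+1) (spansA ++ [((k:Int),(k:Int))]) sA false
                (pvFlush spansB true sB (some e) ++ [((k:Int),(k:Int))]) false sB none hdrop'
                (by simp [pvInv, pvFlush, hsp])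
        · -- other tag
          cases opened with
          | false =>
            obtain ⟨hce, hst, hsp⟩ := hinv
            rw [pvLoopA, pvLoopB]
            rw [if_neg hS, if_neg hB, if_neg hI, if_neg hB, if_neg hI, if_neg hS]
            exact ih (k+1) spansA sA false (pvFlush spansB false sB ce) false sB none hdrop'
              (by simp [pvInv, pvFlush, hsp])
          | true =>
            cases ce with
            | none =>
              obtain ⟨hst, hs, hsp⟩ := hinv
              rw [pvLoopA, pvLoopB]
              rw [if_neg hS, if_neg hB, if_neg hI, if_neg hB, if_neg hI, if_neg hS]
              exact ih (k+1) spansA sA false (pvFlush spansB true sB none) false sB none hdrop'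
                (by simp [pvInv, pvFlush, hsp])
            | some e =>
              obtain ⟨hs, hrest⟩ := hinv
              rw [if_neg (by simp [hI])] at hrest
              obtain ⟨hst, hsp⟩ := hrest
              rw [pvLoopA, pvLoopB]
              rw [if_neg hS, if_neg hB, if_neg hI, if_neg hB, if_neg hI, if_neg hS]
              exact ih (k+1) spansA sA false (pvFlush spansB true sB (some e)) false sB none hdrop'
                (by simp [pvInv, pvFlush, hsp])

-- ===== VERDICT (by name: the statement is the Claim_ definition above) =====
theorem extract_cws_bis_span_spec : Claim_equal_extract_cws_bis_span := by
  intro tag_seq _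
  unfold Spec_extract_cws_bis_span extract_cws_bis_span extract_cws_bis_span_alt
  exact pvMain tag_seq tag_seq 0 [] 0 false [] false 0 none (by simp) (by simp [pvInv])
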